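-- pv_equiv track=rewrite | github.com/farrelljade/my-beginner-projects | replace_with_e.py | replace_with_e
-- ===== SOURCE A (Python) =====
-- def replace_with_e(input_string):
--     result = ""  # Create an empty string to build the output
--     replace = True  # To control replacement
--
--     # Iterate through each character in the input string
--     for char in input_string:
--         if replace and char != ".":  # If the flag is True and the character is not a period
--             result += "e"  # Replace with 'e'
--         else:
--             result += char  # Keep the character as is
--             replace = False  # Set the flag to False after the first period
--
--     return result  # Return the modified string
-- ===== SOURCE B (Python) =====
-- def replace_with_e(input_string):
--     idx = input_string.find('.')
--     if idx == -1:
--         return 'e' * len(input_string)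
--     return 'e' * idx + input_string[idx:]
-- ===== Notes on version B (the rewrite author's own statement) =====
-- stated objective: simpler
-- what changed: Replaces the flag-driven per-character loop with a single delimiter search for the boundary plus string repetition and one slice.
import Mathlib
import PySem

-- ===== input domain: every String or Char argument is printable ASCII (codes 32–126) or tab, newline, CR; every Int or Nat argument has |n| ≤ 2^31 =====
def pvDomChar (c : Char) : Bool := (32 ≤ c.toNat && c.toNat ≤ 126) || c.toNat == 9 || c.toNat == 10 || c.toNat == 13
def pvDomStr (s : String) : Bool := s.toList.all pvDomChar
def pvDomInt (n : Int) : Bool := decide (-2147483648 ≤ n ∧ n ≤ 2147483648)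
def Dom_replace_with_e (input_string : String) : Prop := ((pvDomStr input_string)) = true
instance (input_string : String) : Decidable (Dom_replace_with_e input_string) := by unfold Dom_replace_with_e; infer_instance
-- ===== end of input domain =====

-- B replaces A's flag-driven per-character loop by one find('.') plus repeat-and-slice (objective: simpler).

-- ===== PORT A =====
-- loop body of A: state is (result, replace), branches in A's order
def stepA (st : List Char × Bool) (c : Char) : List Char × Bool :=
  if st.2 && c != '.' then (st.1 ++ ['e'], st.2) else (st.1 ++ [c], false)

def replace_with_e (input_string : String) : String :=
  String.ofList (input_string.toList.foldl stepA ([], true)).1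

-- ===== PORT B =====
def replace_with_e_alt (input_string : String) : String :=
  let cs := input_string.toList
  let idx := PySem.Chars.find cs ['.']
  if idx = -1 then String.ofList (List.replicate cs.length 'e')
  else String.ofList (List.replicate idx.toNat 'e' ++ PySem.List.slice cs (some idx) none)

-- ===== PRECONDITION & SPEC =====
def Spec_replace_with_e (input_string : String) (out : String) : Prop := out = replace_with_e_alt input_string
instance (input_string : String) (out : String) : Decidable (Spec_replace_with_e input_string out) := by unfold Spec_replace_with_e; infer_instance

-- ===== CLAIM (what is proved, stated in full; the proofs are below) =====
def Claim_equal_replace_with_e : Prop := ∀ (input_string : String), Dom_replace_with_e input_string → Spec_replace_with_e input_string (replace_with_e input_string)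

-- ===== LEMMAS AND PROOFS =====

-- A's loop with the flag already false copies the rest of the string
lemma loopA_false (cs : List Char) (acc : List Char) :
    cs.foldl stepA (acc, false) = (acc ++ cs, false) := by
  induction cs generalizing acc with
  | nil => simp
  | cons c tl ih => rw [List.foldl_cons]; simp only [stepA]; simp [ih]

-- A's loop computes replicate-to-first-dot ++ rest (idxOf '.' = length when absent)
lemma loopA_spec (cs : List Char) (acc : List Char) :
    (cs.foldl stepA (acc, true)).1
      = acc ++ List.replicate (cs.idxOf '.') 'e' ++ cs.drop (cs.idxOf '.') := by
  induction cs generalizing acc with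
  | nil => simp
  | cons c tl ih =>
    rw [List.foldl_cons]
    by_cases h : c = '.'
    · subst h
      simp [stepA, List.idxOf_cons_self, loopA_false]
    · have : stepA (acc, true) c = (acc ++ ['e'], true) := by simp [stepA, h]
      rw [this, ih, List.idxOf_cons_ne _ (by simpa using h)]
      simp [List.replicate_succ]

-- find on the one-char pattern ['.'] is idxOf (as Int) when '.' occurs, else -1
lemma find_dot (cs : List Char) :
    PySem.Chars.find cs ['.'] = if '.' ∈ cs then (cs.idxOf '.' : Int) else -1 := by
  by_cases h : '.' ∈ cs
  · simp only [if_pos h]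
    have hlt := List.idxOf_lt_length_of_mem h
    have hdropIdx : ['.'] <+: cs.drop (cs.idxOf '.') := by
      refine ⟨cs.drop (cs.idxOf '.' + 1), ?_⟩
      rw [List.drop_eq_getElem_cons hlt]
      simp [List.getElem_idxOf hlt]
    have hne : PySem.Chars.find cs ['.'] ≠ -1 := by
      rw [PySem.Chars.find_ne_neg_one_iff]
      refine ⟨cs.take (cs.idxOf '.'), cs.drop (cs.idxOf '.' + 1), ?_⟩
      rw [List.append_assoc, show ['.'] ++ cs.drop (cs.idxOf '.' + 1) = cs.drop (cs.idxOf '.') from by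
        rw [List.drop_eq_getElem_cons hlt]; simp [List.getElem_idxOf hlt]]
      exact List.take_append_drop _ _
    have hnn : 0 ≤ PySem.Chars.find cs ['.'] := by
      rcases (PySem.Chars.neg_one_le_find cs ['.']).lt_or_eq with hlt' | heq
      · omega
      · exact absurd heq.symm hne
    obtain ⟨hpre, hmin⟩ := PySem.Chars.find_spec (s := cs) (sub := ['.']) hnn
    set k := (PySem.Chars.find cs ['.']).toNat with hk
    have hk_lt : k < cs.length := by
      have h1 := hpre.length_le
      simp at h1
      omega
    have hck : cs[k] = '.' := by
      have h2 : cs[k]? = some '.' := by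
        rw [List.drop_eq_getElem_cons hk_lt] at hpre
        obtain ⟨t, ht⟩ := hpre
        have := congrArg (·.head?) ht
        simpa [List.getElem?_eq_getElem hk_lt] using this.symm
      simpa [List.getElem?_eq_getElem hk_lt] using h2
    have h1 : cs.idxOf '.' ≤ k :=
      Nat.lt_succ_iff.mp ((List.mem_take_iff_idxOf_lt h).mp
        (List.mem_take_iff_getElem.mpr ⟨k, by omega, hck⟩))
    have h2 : ¬ (cs.idxOf '.' < k) := fun hlt' => hmin _ hlt' hdropIdx
    omega
  · simp only [if_neg h]
    rw [PySem.Chars.find_eq_neg_one_iff]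
    intro hin
    exact h (hin.mem (by simp))

-- ===== VERDICT (by name: the statement is the Claim_ definition above) =====
theorem replace_with_e_spec : Claim_equal_replace_with_e := by
  intro s _
  unfold Spec_replace_with_e replace_with_e replace_with_e_alt
  simp only [find_dot]
  by_cases h : '.' ∈ s.toList
  · have hlt := List.idxOf_lt_length_of_mem h
    simp only [if_pos h]
    rw [if_neg (by omega), PySem.List.slice_some_none, loopA_spec]
    simp only [PySem.List.clampIdx_natCast]
    rw [Nat.min_eq_left (by simpa using Nat.le_of_lt hlt)]
    simp
  · have hidx : s.toList.idxOf '.' = s.toList.length := List.idxOf_eq_length_iff.mpr h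
    rw [if_neg h, if_pos rfl, loopA_spec]
    simp [hidx]
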